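-- pv_equiv track=rewrite | github.com/maix00/Codes | futures_data_mink/DataMinkBasics.py | windcode_to_shortened_windcode
-- ===== SOURCE A (Python) =====
-- def windcode_to_shortened_windcode(windcode: str) -> str:
--     # 去掉第一个数字，如果数字有四位的话，否则三位则不动
--     # 例如: RB2210F.DCE -> RB210F.DCE, RB210.DCE -> RB210.DCE
--     first_digit_idx = -1
--     last_digit_idx = -1
--     for i in range(len(windcode)):
--         if i > 0 and not windcode[i - 1].isdigit() and windcode[i].isdigit():
--             first_digit_idx = i
--         if i < len(windcode) - 1 and windcode[i].isdigit() and not windcode[i + 1].isdigit():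
--             last_digit_idx = i
--             break
--     if first_digit_idx == -1 or last_digit_idx == -1:
--         raise ValueError(f"windcode格式不正确: {windcode}")
--     if last_digit_idx - first_digit_idx == 3:
--         return windcode[:first_digit_idx] + windcode[first_digit_idx + 1:]
--     elif last_digit_idx - first_digit_idx == 2:
--         return windcode
--     else:
--         raise ValueError(f"windcode格式不正确: {windcode}")
-- ===== SOURCE B (Python) =====
-- def windcode_to_shortened_windcode(windcode: str) -> str:
--     # Group the string into maximal same-kind runs (digit / non-digit), then
--     # decide everything from the first three runs.
--     runs = []
--     for ch in windcode:
--         if runs and runs[-1][0] == ch.isdigit():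
--             runs[-1][1] += ch
--         else:
--             runs.append([ch.isdigit(), ch])
--     if len(runs) >= 3 and not runs[0][0] and runs[1][0] and len(runs[1][1]) in (3, 4):
--         if len(runs[1][1]) == 4:
--             return runs[0][1] + runs[1][1][1:] + "".join(r[1] for r in runs[2:])
--         return windcode
--     raise ValueError(f"windcode格式不正确: {windcode}")
-- ===== Notes on version B (the rewrite author's own statement) =====
-- stated objective: alternative
-- what changed: A scans index positions comparing each char with its neighbours to track two sentinel indices with a break; B first groups the whole string into maximal digit/non-digit runs (run-length grouping) and then decides everything from the first three runs, rebuilding the output by concatenating runs.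
import Mathlib
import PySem

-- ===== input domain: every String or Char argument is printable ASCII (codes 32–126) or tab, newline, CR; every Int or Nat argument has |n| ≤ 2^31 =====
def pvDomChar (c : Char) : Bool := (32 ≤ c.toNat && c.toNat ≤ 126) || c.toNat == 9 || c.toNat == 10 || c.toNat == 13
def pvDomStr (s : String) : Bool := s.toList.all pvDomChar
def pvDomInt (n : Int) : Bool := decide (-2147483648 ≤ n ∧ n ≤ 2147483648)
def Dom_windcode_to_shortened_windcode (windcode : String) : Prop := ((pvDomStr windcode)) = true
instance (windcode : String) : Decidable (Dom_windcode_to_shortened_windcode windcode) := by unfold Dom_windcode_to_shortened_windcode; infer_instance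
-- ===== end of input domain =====

-- B replaces A's neighbour-comparison index scan (two sentinel indices + break) by a run-length
-- grouping of the whole string into maximal digit/non-digit runs, deciding from the first three
-- runs; same result wherever A returns (objective: alternative).


-- ===== PORT A =====
-- A's for-loop over range(len) with the break; every index it reads (i-1 when i>0, i, i+1 when
-- i<len-1) is provably in range, so getD is exact for Python's windcode[j] here.
def pvALoop (cs : List Char) (i : Nat) (first last : Int) : Int × Int :=
  if i < cs.length then
    let first' := if 0 < i ∧ PySem.Chars.isdigit (cs.getD (i - 1) ' ') = false ∧
                       PySem.Chars.isdigit (cs.getD i ' ') = true then (i : Int) else first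
    if i + 1 < cs.length ∧ PySem.Chars.isdigit (cs.getD i ' ') = true ∧
         PySem.Chars.isdigit (cs.getD (i + 1) ' ') = false then (first', (i : Int))
    else pvALoop cs (i + 1) first' last
  else (first, last)
termination_by cs.length - i

-- the two raise-branches return "" (excluded by Pre_)
def windcode_to_shortened_windcode (windcode : String) : String :=
  let cs := windcode.toList
  let fl := pvALoop cs 0 (-1) (-1)
  if fl.1 = -1 ∨ fl.2 = -1 then ""
  else if fl.2 - fl.1 = 3 then
    String.ofList (PySem.List.slice cs none (some fl.1) ++ PySem.List.slice cs (some (fl.1 + 1)) none)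
  else if fl.2 - fl.1 = 2 then windcode
  else ""

-- ===== PORT B =====
-- Source B's grouping loop. The Python appends at the END of `runs` and mutates `runs[-1]`; the
-- accumulator here is kept newest-first (head = runs[-1]) and reversed when the loop ends.
def pvRunsLoop : List Char → List (Bool × List Char) → List (Bool × List Char)
  | [], acc => acc.reverse
  | c :: rest, (b, s) :: t =>
      if b = PySem.Chars.isdigit c then pvRunsLoop rest ((b, s ++ [c]) :: t)
      else pvRunsLoop rest ((PySem.Chars.isdigit c, [c]) :: (b, s) :: t)
  | c :: rest, [] => pvRunsLoop rest [(PySem.Chars.isdigit c, [c])]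

-- the raise branch returns "" (excluded by Pre_); "".join is list concatenation, exact on strings
def windcode_to_shortened_windcode_alt (windcode : String) : String :=
  let runs := pvRunsLoop windcode.toList []
  match runs with
  | (b0, s0) :: (b1, s1) :: _ :: _ =>
      if b0 = false ∧ b1 = true ∧ (s1.length = 3 ∨ s1.length = 4) then
        if s1.length = 4 then
          String.ofList (s0 ++ s1.drop 1 ++ (runs.drop 2).foldl (fun a r => a ++ r.2) [])
        else windcode
      else ""
  | _ => ""

-- ===== PRECONDITION & SPEC =====
-- Pre_ holds exactly when A returns (raises a ValueError otherwise): the string starts with a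
-- nonempty non-digit block, its first digit run has length 3 or 4, and something follows the run.
def Pre_windcode_to_shortened_windcode (windcode : String) : Prop :=
  let cs := windcode.toList
  let rest := cs.dropWhile (fun c => !PySem.Chars.isdigit c)
  0 < (cs.takeWhile (fun c => !PySem.Chars.isdigit c)).length ∧
  ((rest.takeWhile (fun c => PySem.Chars.isdigit c)).length = 3 ∨
   (rest.takeWhile (fun c => PySem.Chars.isdigit c)).length = 4) ∧
  rest.dropWhile (fun c => PySem.Chars.isdigit c) ≠ []
instance (windcode : String) : Decidable (Pre_windcode_to_shortened_windcode windcode) := by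
  unfold Pre_windcode_to_shortened_windcode; infer_instance

def pvWitness_windcode_to_shortened_windcode : String := "RB2210F.DCE"

def Spec_windcode_to_shortened_windcode (windcode : String) (out : String) : Prop :=
  out = windcode_to_shortened_windcode_alt windcode
instance (windcode : String) (out : String) : Decidable (Spec_windcode_to_shortened_windcode windcode out) := by
  unfold Spec_windcode_to_shortened_windcode; infer_instance

-- ===== CLAIM (what is proved, stated in full; the proofs are below) =====
def Claim_equal_windcode_to_shortened_windcode : Prop := ∀ (windcode : String), Dom_windcode_to_shortened_windcode windcode → Pre_windcode_to_shortened_windcode windcode → Spec_windcode_to_shortened_windcode windcode (windcode_to_shortened_windcode windcode)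

-- ===== LEMMAS AND PROOFS =====

-- A's loop on the decomposed string returns (p, p+r-1)
theorem pvALoop_eq (cs : List Char) (p r : Nat)
    (hp : 0 < p) (hpr : p + r < cs.length) (hr : r = 3 ∨ r = 4)
    (hpre : ∀ j, j < p → PySem.Chars.isdigit (cs.getD j ' ') = false)
    (hrun : ∀ j, p ≤ j → j < p + r → PySem.Chars.isdigit (cs.getD j ' ') = true)
    (hend : PySem.Chars.isdigit (cs.getD (p + r) ' ') = false) :
    pvALoop cs 0 (-1) (-1) = ((p : Int), ((p + r - 1 : Nat) : Int)) := by
  -- phase 1: the all-non-digit prefix is crossed with both sentinels unchanged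
  have phase1 : ∀ n i, i + n = p → pvALoop cs i (-1) (-1) = pvALoop cs p (-1) (-1) := by
    intro n
    induction n with
    | zero =>
      intro i h
      obtain rfl : i = p := by omega
      rfl
    | succ n ih =>
      intro i h
      have hdi : PySem.Chars.isdigit (cs.getD i ' ') = false := hpre i (by omega)
      have c1 : ¬ (0 < i ∧ PySem.Chars.isdigit (cs.getD (i - 1) ' ') = false ∧
          PySem.Chars.isdigit (cs.getD i ' ') = true) := by
        rintro ⟨_, _, h3⟩; rw [hdi] at h3; cases h3
      have c2 : ¬ (i + 1 < cs.length ∧ PySem.Chars.isdigit (cs.getD i ' ') = true ∧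
          PySem.Chars.isdigit (cs.getD (i + 1) ' ') = false) := by
        rintro ⟨_, h2, _⟩; rw [hdi] at h2; cases h2
      rw [pvALoop, if_pos (show i < cs.length by omega)]
      simp only [if_neg c1, if_neg c2]
      exact ih (i + 1) (by omega)
  -- phase 2: at i = p the first index is recorded
  have phase2 : pvALoop cs p (-1) (-1) = pvALoop cs (p + 1) (p : Int) (-1) := by
    have c1 : 0 < p ∧ PySem.Chars.isdigit (cs.getD (p - 1) ' ') = false ∧
        PySem.Chars.isdigit (cs.getD p ' ') = true :=
      ⟨hp, hpre (p - 1) (by omega), hrun p le_rfl (by omega)⟩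
    have c2 : ¬ (p + 1 < cs.length ∧ PySem.Chars.isdigit (cs.getD p ' ') = true ∧
        PySem.Chars.isdigit (cs.getD (p + 1) ' ') = false) := by
      rintro ⟨_, _, h3⟩
      rw [hrun (p + 1) (by omega) (by omega)] at h3; cases h3
    rw [pvALoop, if_pos (show p < cs.length by omega)]
    simp only [if_pos c1, if_neg c2]
  -- phase 3: the interior of the digit run changes nothing
  have phase3 : ∀ n i, p < i → i + n = p + r - 1 →
      pvALoop cs i (p : Int) (-1) = pvALoop cs (p + r - 1) (p : Int) (-1) := by
    intro n
    induction n with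
    | zero =>
      intro i _ h
      obtain rfl : i = p + r - 1 := by omega
      rfl
    | succ n ih =>
      intro i hpi h
      have c1 : ¬ (0 < i ∧ PySem.Chars.isdigit (cs.getD (i - 1) ' ') = false ∧
          PySem.Chars.isdigit (cs.getD i ' ') = true) := by
        rintro ⟨_, h2, _⟩
        rw [hrun (i - 1) (by omega) (by omega)] at h2; cases h2
      have c2 : ¬ (i + 1 < cs.length ∧ PySem.Chars.isdigit (cs.getD i ' ') = true ∧
          PySem.Chars.isdigit (cs.getD (i + 1) ' ') = false) := by
        rintro ⟨_, _, h3⟩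
        rw [hrun (i + 1) (by omega) (by omega)] at h3; cases h3
      rw [pvALoop, if_pos (show i < cs.length by omega)]
      simp only [if_neg c1, if_neg c2]
      exact ih (i + 1) (by omega) (by omega)
  -- phase 4: the loop breaks at the last digit of the run
  have phase4 : pvALoop cs (p + r - 1) (p : Int) (-1) = ((p : Int), ((p + r - 1 : Nat) : Int)) := by
    have c1 : ¬ (0 < p + r - 1 ∧ PySem.Chars.isdigit (cs.getD (p + r - 1 - 1) ' ') = false ∧
        PySem.Chars.isdigit (cs.getD (p + r - 1) ' ') = true) := by
      rintro ⟨_, h2, _⟩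
      rw [hrun (p + r - 1 - 1) (by omega) (by omega)] at h2; cases h2
    have c2 : p + r - 1 + 1 < cs.length ∧ PySem.Chars.isdigit (cs.getD (p + r - 1) ' ') = true ∧
        PySem.Chars.isdigit (cs.getD (p + r - 1 + 1) ' ') = false := by
      refine ⟨by omega, hrun (p + r - 1) (by omega) (by omega), ?_⟩
      have : p + r - 1 + 1 = p + r := by omega
      rw [this]; exact hend
    rw [pvALoop, if_pos (show p + r - 1 < cs.length by omega)]
    simp only [if_neg c1, if_pos c2]
  rw [phase1 p 0 (by omega), phase2, phase3 (p + r - 1 - (p + 1)) (p + 1) (by omega) (by omega),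
    phase4]

-- B's loop absorbs a block of characters whose digit-flag equals the current run's flag
theorem pvRunsLoop_absorb (u rest : List Char) (b : Bool) (s : List Char)
    (t : List (Bool × List Char)) (hu : ∀ c ∈ u, PySem.Chars.isdigit c = b) :
    pvRunsLoop (u ++ rest) ((b, s) :: t) = pvRunsLoop rest ((b, s ++ u) :: t) := by
  induction u generalizing s with
  | nil => simp
  | cons c u ih =>
    have hc : PySem.Chars.isdigit c = b := hu c (by simp)
    rw [List.cons_append, pvRunsLoop, hc, if_pos rfl, ih (s ++ [c]) (fun x hx => hu x (by simp [hx]))]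
    simp

-- B's loop never touches runs below the top one
theorem pvRunsLoop_bottom (cs : List Char) (x : Bool × List Char) (u t : List (Bool × List Char)) :
    pvRunsLoop cs ((x :: u) ++ t) = t.reverse ++ pvRunsLoop cs (x :: u) := by
  induction cs generalizing x u with
  | nil => simp [pvRunsLoop]
  | cons c rest ih =>
    obtain ⟨b, s⟩ := x
    rw [List.cons_append, pvRunsLoop, pvRunsLoop]
    split_ifs with h
    · exact ih (b, s ++ [c]) u
    · rw [show ((PySem.Chars.isdigit c, [c]) :: (b, s) :: (u ++ t)) =
          (((PySem.Chars.isdigit c, [c]) :: (b, s) :: u) ++ t) by simp]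
      exact ih (PySem.Chars.isdigit c, [c]) ((b, s) :: u)

-- the runs flatten back to the input
theorem pvRunsLoop_flat (cs : List Char) (acc : List (Bool × List Char)) :
    ((pvRunsLoop cs acc).map Prod.snd).flatten = ((acc.reverse).map Prod.snd).flatten ++ cs := by
  induction cs generalizing acc with
  | nil => simp [pvRunsLoop]
  | cons c rest ih =>
    match acc with
    | [] => rw [pvRunsLoop, ih]; simp
    | (b, s) :: t =>
      rw [pvRunsLoop]
      split_ifs with h
      · rw [ih]; simp
      · rw [ih]; simp

-- both ports agree once the string is decomposed as non-digits ++ digit-run ++ rest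
theorem pv_main (w : String) (A B C : List Char)
    (hcs : w.toList = A ++ (B ++ C))
    (hA : ∀ c ∈ A, PySem.Chars.isdigit c = false)
    (hB : ∀ c ∈ B, PySem.Chars.isdigit c = true)
    (hAne : A ≠ []) (hr : B.length = 3 ∨ B.length = 4)
    (hCne : C ≠ []) (hC0 : PySem.Chars.isdigit (C.getD 0 ' ') = false) :
    windcode_to_shortened_windcode w = windcode_to_shortened_windcode_alt w := by
  obtain ⟨a0, A', rfl⟩ := List.exists_cons_of_ne_nil hAne
  obtain ⟨c0, C', rfl⟩ := List.exists_cons_of_ne_nil hCne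
  obtain ⟨b0, B', rfl⟩ : ∃ b0 B', B = b0 :: B' := by
    cases B with
    | nil => simp at hr
    | cons b0 B' => exact ⟨b0, B', rfl⟩
  have hc0 : PySem.Chars.isdigit c0 = false := by simpa using hC0
  -- index-wise facts for the A-side loop
  have hpre : ∀ j, j < A'.length + 1 →
      PySem.Chars.isdigit (w.toList.getD j ' ') = false := by
    intro j hj
    have hj' : j < (a0 :: A').length := by simp; omega
    rw [hcs, List.getD_append _ _ _ _ hj', List.getD_eq_getElem _ _ hj']
    exact hA _ (List.getElem_mem _)
  have hrun : ∀ j, A'.length + 1 ≤ j → j < A'.length + 1 + (B'.length + 1) →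
      PySem.Chars.isdigit (w.toList.getD j ' ') = true := by
    intro j h1 h2
    have hj1 : (a0 :: A').length ≤ j := by simp; omega
    have hj2 : j - (a0 :: A').length < (b0 :: B').length := by simp; omega
    rw [hcs, List.getD_append_right _ _ _ _ hj1, List.getD_append _ _ _ _ hj2,
      List.getD_eq_getElem _ _ hj2]
    exact hB _ (List.getElem_mem _)
  have hend : PySem.Chars.isdigit (w.toList.getD (A'.length + 1 + (B'.length + 1)) ' ') = false := by
    rw [hcs, List.getD_append_right _ _ _ _ (by simp),
      List.getD_append_right _ _ _ _ (by simp)]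
    have hidx : A'.length + 1 + (B'.length + 1) - (a0 :: A').length - (b0 :: B').length = 0 := by
      simp
    rw [hidx]
    simpa using hc0
  have hpr : A'.length + 1 + (B'.length + 1) < w.toList.length := by
    rw [hcs]; simp only [List.length_append, List.length_cons]; omega
  have hr' : B'.length + 1 = 3 ∨ B'.length + 1 = 4 := by simpa using hr
  have hAres := pvALoop_eq w.toList (A'.length + 1) (B'.length + 1) (by omega) hpr hr' hpre hrun hend
  rw [show A'.length + 1 + (B'.length + 1) - 1 = A'.length + 1 + B'.length from by omega] at hAres
  -- the B-side grouping
  have hruns : pvRunsLoop w.toList [] =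
      (false, a0 :: A') :: (true, b0 :: B') :: pvRunsLoop C' [(false, [c0])] := by
    rw [hcs]
    calc pvRunsLoop ((a0 :: A') ++ ((b0 :: B') ++ (c0 :: C'))) []
        = pvRunsLoop (A' ++ ((b0 :: B') ++ (c0 :: C'))) [(false, [a0])] := by
          rw [List.cons_append, pvRunsLoop, hA a0 (by simp)]
      _ = pvRunsLoop ((b0 :: B') ++ (c0 :: C')) [(false, a0 :: A')] := by
          rw [pvRunsLoop_absorb A' _ false [a0] [] (fun c hc => hA c (by simp [hc]))]
          simp
      _ = pvRunsLoop (B' ++ (c0 :: C')) [(true, [b0]), (false, a0 :: A')] := by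
          rw [List.cons_append, pvRunsLoop, hB b0 (by simp), if_neg (by simp)]
      _ = pvRunsLoop (c0 :: C') [(true, b0 :: B'), (false, a0 :: A')] := by
          rw [pvRunsLoop_absorb B' _ true [b0] _ (fun c hc => hB c (by simp [hc]))]
          simp
      _ = pvRunsLoop C' [(false, [c0]), (true, b0 :: B'), (false, a0 :: A')] := by
          rw [pvRunsLoop, hc0, if_neg (by simp)]
      _ = (false, a0 :: A') :: (true, b0 :: B') :: pvRunsLoop C' [(false, [c0])] := by
          have := pvRunsLoop_bottom C' (false, [c0]) [] [(true, b0 :: B'), (false, a0 :: A')]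
          simpa using this
  have hflat : ((pvRunsLoop C' [(false, [c0])]).map Prod.snd).flatten = c0 :: C' := by
    rw [pvRunsLoop_flat]; simp
  obtain ⟨R0, R1, hR⟩ : ∃ R0 R1, pvRunsLoop C' [(false, [c0])] = R0 :: R1 := by
    cases hRR : pvRunsLoop C' [(false, [c0])] with
    | nil => rw [hRR] at hflat; simp at hflat
    | cons R0 R1 => exact ⟨R0, R1, rfl⟩
  have hfold : (R0 :: R1).foldl (fun a r => a ++ r.2) ([] : List Char) = c0 :: C' := by
    have h := PySem.List.foldl_append_eq_flatMap
      (g := fun r : Bool × List Char => r.2) (acc := ([] : List Char)) (l := R0 :: R1)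
    rw [hR] at hflat
    exact h.trans (by simpa [List.flatMap_def] using hflat)
  -- evaluate both ports
  simp only [windcode_to_shortened_windcode, windcode_to_shortened_windcode_alt, hAres, hruns, hR,
    List.length_cons, true_and]
  have hdrop2 : List.drop 2 ((false, a0 :: A') :: (true, b0 :: B') :: R0 :: R1) = R0 :: R1 := rfl
  rcases hr' with hr3 | hr4
  · -- run of length 3: both return the input unchanged
    split_ifs with g1 g2 g3 g4 g5
    all_goals try (exfalso; omega)
    all_goals try (exfalso; simp_all; done)
    all_goals rfl
  · -- run of length 4: both drop the first digit
    split_ifs with g1 g2 g3 g4 g5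
    all_goals try (exfalso; omega)
    all_goals try (exfalso; simp_all; done)
    rw [hdrop2, hfold]
    have hsl1 : PySem.List.slice w.toList none (some ((A'.length + 1 : Nat) : Int)) =
        w.toList.take (A'.length + 1) := PySem.List.slice_to_natCast _ _
    have hsl2 : PySem.List.slice w.toList (some (((A'.length + 1 : Nat) : Int) + 1)) none =
        w.toList.drop (A'.length + 1 + 1) := by
      rw [show (((A'.length + 1 : Nat) : Int) + 1) = ((A'.length + 1 + 1 : Nat) : Int) by push_cast; ring]
      exact PySem.List.slice_from_natCast _ _
    rw [hsl1, hsl2, hcs]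
    have htake : ((a0 :: A') ++ ((b0 :: B') ++ (c0 :: C'))).take (A'.length + 1) = a0 :: A' := by
      rw [show A'.length + 1 = (a0 :: A').length by simp]
      simp
    have hdrop : ((a0 :: A') ++ ((b0 :: B') ++ (c0 :: C'))).drop (A'.length + 1 + 1) =
        B' ++ (c0 :: C') := by
      rw [show A'.length + 1 + 1 = (a0 :: A').length + 1 by simp, List.drop_append]
      simp
    rw [htake, hdrop]
    congr 1
    simp

-- ===== VERDICT (by name: the statement is the Claim_ definition above) =====
theorem windcode_to_shortened_windcode_spec : Claim_equal_windcode_to_shortened_windcode := by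
  intro windcode _ hpre
  simp only [Pre_windcode_to_shortened_windcode] at hpre
  obtain ⟨h1, h2, h3⟩ := hpre
  unfold Spec_windcode_to_shortened_windcode
  refine pv_main windcode
    (windcode.toList.takeWhile (fun c => !PySem.Chars.isdigit c))
    ((windcode.toList.dropWhile (fun c => !PySem.Chars.isdigit c)).takeWhile
      (fun c => PySem.Chars.isdigit c))
    ((windcode.toList.dropWhile (fun c => !PySem.Chars.isdigit c)).dropWhile
      (fun c => PySem.Chars.isdigit c))
    ?_ ?_ ?_ ?_ h2 h3 ?_
  · rw [List.takeWhile_append_dropWhile, List.takeWhile_append_dropWhile]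
  · intro c hc
    have := List.mem_takeWhile_imp hc
    simpa using this
  · intro c hc
    exact List.mem_takeWhile_imp hc
  · intro hAnil
    rw [hAnil] at h1; simp at h1
  · have hl : 0 < ((windcode.toList.dropWhile (fun c => !PySem.Chars.isdigit c)).dropWhile
        (fun c => PySem.Chars.isdigit c)).length := List.length_pos_of_ne_nil h3
    have hz := List.dropWhile_get_zero_not (fun c => PySem.Chars.isdigit c)
      (windcode.toList.dropWhile (fun c => !PySem.Chars.isdigit c)) hl
    rw [List.getD_eq_getElem _ _ hl]
    simpa using hz
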